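-- pv_equiv track=rewrite | github.com/maulidaannisa/data-augmentation | ner_aug/augment_data_conll.py | get_category2mentions
-- ===== SOURCE A (Python) =====
-- def get_category2mentions(sentences, labels):
--     mentions = []
--     for sent_index, sentence in enumerate(sentences):
--         mention = []
--         for token_index, token in enumerate(sentence):
--             label = labels[sent_index][token_index].strip()
--             if label == "O" or label[0] == "B":
--                 if len(mention) > 0:
--                     mentions.append(mention)
--                 mention = []
--             if label[0] == "B": mention.append(label[2:])
--             if label != "O": mention.append(token)
--         if len(mention) > 0:
--             mentions.append(mention)
--
--     category2mentions = {}
--     for mention in mentions: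
--         if mention[0] not in category2mentions: category2mentions[mention[0]] = {}
--         category2mentions[mention[0]][" ".join(mention[1:])] = 1
--
--     for category in category2mentions.keys():
--         mentions = list(category2mentions[category].keys())
--         category2mentions[category] = mentions
--     return category2mentions
-- ===== SOURCE B (Python) =====
-- def get_category2mentions(sentences, labels):
--     category2mentions = {}
--     for sentence, labs in zip(sentences, labels):
--         labs = [lab.strip() for lab in labs]
--         n = len(sentence)
--         i = 0
--         while i < n:
--             if labs[i] == "O":
--                 i += 1
--                 continue
--             j = i + 1
--             while j < n and labs[j] != "O" and labs[j][0] != "B":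
--                 j += 1
--             mention = sentence[i:j]
--             if labs[i][0] == "B":
--                 mention = [labs[i][2:]] + mention
--             texts = category2mentions.setdefault(mention[0], {})
--             texts[" ".join(mention[1:])] = 1
--             i = j
--     return {category: list(texts) for category, texts in category2mentions.items()}
-- ===== Notes on version B (the rewrite author's own statement) =====
-- stated objective: alternative
-- what changed: B replaces A's per-token state machine (carrying an open 'mention' accumulator through every token) plus two separate grouping passes over an intermediate mentions list by a single pass: a two-pointer segment scan per sentence that delimits each whole BIO mention run at once and inserts it directly into the category->texts mapping (insertion-ordered dedup via an inner dict), so the intermediate mentions list and the separate grouping loop disappear.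
import Mathlib
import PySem

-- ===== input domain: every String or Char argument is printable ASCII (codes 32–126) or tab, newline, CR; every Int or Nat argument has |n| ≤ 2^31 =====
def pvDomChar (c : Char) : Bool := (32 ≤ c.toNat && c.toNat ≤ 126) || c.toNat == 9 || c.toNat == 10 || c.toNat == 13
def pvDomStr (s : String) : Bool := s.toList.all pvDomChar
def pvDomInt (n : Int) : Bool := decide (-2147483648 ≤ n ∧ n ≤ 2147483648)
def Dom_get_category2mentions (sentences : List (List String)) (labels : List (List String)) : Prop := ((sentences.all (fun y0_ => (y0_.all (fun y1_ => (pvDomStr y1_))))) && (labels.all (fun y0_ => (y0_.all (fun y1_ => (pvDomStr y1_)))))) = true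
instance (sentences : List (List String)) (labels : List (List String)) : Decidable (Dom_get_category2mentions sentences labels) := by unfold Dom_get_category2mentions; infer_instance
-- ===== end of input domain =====

-- B is an alternative algorithm of the same cost: a single pass whose two-pointer segment scan
-- delimits each whole BIO mention run at once and inserts it directly into the category→texts
-- mapping, replacing A's per-token open-mention state machine plus two grouping passes over an
-- intermediate mentions list.

-- ===== PORT A =====

-- body of A's inner 'for token_index, token in enumerate(sentence)' loop; state = (mention, mentions)
def pvInnerA (labels : List (List String)) (sent_index : Int)
    (st : List String × List (List String)) (p : Int × String) : List String × List (List String) :=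
  let label := PySem.Str.strip (PySem.List.pyGetD (PySem.List.pyGetD labels sent_index []) p.1 "")
  let st :=
    if label == "O" || PySem.Str.pyGet? label 0 == some 'B' then
      (([] : List String), if st.1.length > 0 then st.2 ++ [st.1] else st.2)
    else st
  let mention := if PySem.Str.pyGet? label 0 == some 'B' then st.1 ++ [PySem.Str.slice label (some 2) none] else st.1
  let mention := if label != "O" then mention ++ [p.2] else mention
  (mention, st.2)

-- body of A's outer 'for sent_index, sentence in enumerate(sentences)' loop
def pvOuterA (labels : List (List String)) (mentions : List (List String)) (q : Int × List String) : List (List String) :=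
  let st := (PySem.List.enumerate q.2 0).foldl (pvInnerA labels q.1) ([], mentions)
  if st.1.length > 0 then st.2 ++ [st.1] else st.2

-- body of A's 'for mention in mentions' grouping loop (dict of dicts)
def pvGroupA (d : PySem.Dict String (PySem.Dict String Int)) (mention : List String) : PySem.Dict String (PySem.Dict String Int) :=
  let m0 := PySem.List.pyGetD mention 0 ""
  let d := if d.contains m0 then d else d.insert m0 PySem.Dict.empty
  d.insert m0 ((d.getD m0 PySem.Dict.empty).insert (PySem.Str.join " " (PySem.List.slice mention (some 1) none)) 1)

def get_category2mentions (sentences : List (List String)) (labels : List (List String)) : List (String × List String) :=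
  let mentions := (PySem.List.enumerate sentences 0).foldl (pvOuterA labels) []
  let d := mentions.foldl pvGroupA PySem.Dict.empty
  -- final loop: each inner dict is replaced by the list of its keys
  d.items.map (fun p => (p.1, p.2.keys))

-- ===== PORT B =====

-- continuation test of B's inner 'while j < n and labs[j] != "O" and labs[j][0] != "B"'
def pvContP (p : String × String) : Bool := p.2 != "O" && !(PySem.Str.pyGet? p.2 0 == some 'B')

-- B's 'while i < n' loop over one sentence (labs already stripped): delimit a whole mention run,
-- insert it into the category→texts dict, continue after the run
def pvSegLoop (toks labs : List String) (d : PySem.Dict String (PySem.Dict String Int)) : PySem.Dict String (PySem.Dict String Int) :=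
  match toks, labs with
  | [], _ => d
  | _ :: _, [] => d   -- Python would raise IndexError here; outside Pre_
  | t :: ts, l :: ls =>
    if l == "O" then pvSegLoop ts ls d
    else
      let z := ts.zip ls
      let cont := z.takeWhile pvContP
      let rest := z.drop cont.length
      let mention := t :: cont.map Prod.fst
      let mention := if PySem.Str.pyGet? l 0 == some 'B' then PySem.Str.slice l (some 2) none :: mention else mention
      let m0 := PySem.List.pyGetD mention 0 ""
      let d := d.setdefault m0 PySem.Dict.empty
      let d := d.insert m0 ((d.getD m0 PySem.Dict.empty).insert (PySem.Str.join " " (PySem.List.slice mention (some 1) none)) 1)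
      pvSegLoop (rest.map Prod.fst) (rest.map Prod.snd) d
termination_by toks.length
decreasing_by all_goals (simp only [List.length_cons, List.length_map, List.length_drop, List.length_zip]; omega)

def get_category2mentions_alt (sentences : List (List String)) (labels : List (List String)) : List (String × List String) :=
  (((sentences.zip labels).foldl
    (fun d p => pvSegLoop p.1 (p.2.map PySem.Str.strip) d) PySem.Dict.empty).items).map
    (fun p => (p.1, p.2.keys))

-- ===== PRECONDITION & SPEC =====
-- Pre_ excludes exactly the inputs on which A raises IndexError: a nonempty sentence whose label row
-- is missing or shorter than the sentence, or a used label that is empty after strip().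
def Pre_get_category2mentions (sentences : List (List String)) (labels : List (List String)) : Prop :=
  ∀ i < sentences.length, sentences.getD i [] ≠ [] →
    i < labels.length ∧ (sentences.getD i []).length ≤ (labels.getD i []).length ∧
    ∀ l ∈ (labels.getD i []).take (sentences.getD i []).length, PySem.Str.strip l ≠ ""

instance (sentences : List (List String)) (labels : List (List String)) : Decidable (Pre_get_category2mentions sentences labels) := by
  unfold Pre_get_category2mentions; infer_instance

def pvWitness_get_category2mentions : List (List String) × List (List String) :=
  ([["Anna", "went", "home"]], [["B-PER", "O", "I-LOC"]])

def Spec_get_category2mentions (sentences : List (List String)) (labels : List (List String)) (out : List (String × List String)) : Prop := out = get_category2mentions_alt sentences labels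
instance (sentences : List (List String)) (labels : List (List String)) (out : List (String × List String)) : Decidable (Spec_get_category2mentions sentences labels out) := by unfold Spec_get_category2mentions; infer_instance

-- ===== CLAIM (what is proved, stated in full; the proofs are below) =====
def Claim_equal_get_category2mentions : Prop := ∀ (sentences : List (List String)) (labels : List (List String)), Dom_get_category2mentions sentences labels → Pre_get_category2mentions sentences labels → Spec_get_category2mentions sentences labels (get_category2mentions sentences labels)

-- ===== LEMMAS AND PROOFS =====

-- A's inner step, on a (token, stripped label) pair
def pvStepP (st : List String × List (List String)) (p : String × String) : List String × List (List String) :=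
  let label := p.2
  let st :=
    if label == "O" || PySem.Str.pyGet? label 0 == some 'B' then
      (([] : List String), if st.1.length > 0 then st.2 ++ [st.1] else st.2)
    else st
  let mention := if PySem.Str.pyGet? label 0 == some 'B' then st.1 ++ [PySem.Str.slice label (some 2) none] else st.1
  let mention := if label != "O" then mention ++ [p.1] else mention
  (mention, st.2)

-- mentions produced by A's state machine from open mention m over (token, label) pairs
def pvRunA (m : List String) : List (String × String) → List (List String)
  | [] => if m.length > 0 then [m] else []
  | (t, l) :: rest =>
    if l == "O" then (if m.length > 0 then [m] else []) ++ pvRunA [] rest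
    else if PySem.Str.pyGet? l 0 == some 'B' then
      (if m.length > 0 then [m] else []) ++ pvRunA [PySem.Str.slice l (some 2) none, t] rest
    else pvRunA (m ++ [t]) rest

-- B's mention runs of a (token, label) pair list
def pvSegsM : List (String × String) → List (List String)
  | [] => []
  | (t, l) :: rest =>
    if l == "O" then pvSegsM rest
    else
      let cont := rest.takeWhile pvContP
      (if PySem.Str.pyGet? l 0 == some 'B' then
        PySem.Str.slice l (some 2) none :: t :: cont.map Prod.fst
      else
        t :: cont.map Prod.fst) :: pvSegsM (rest.drop cont.length)
termination_by ps => ps.length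
decreasing_by all_goals (simp only [List.length_cons, List.length_drop]; omega)

theorem pvStepP_O (t : String) (st : List String × List (List String)) :
    pvStepP st (t, "O") = (([] : List String), if st.1.length > 0 then st.2 ++ [st.1] else st.2) := by
  simp [pvStepP]

theorem pvStepP_B (t l : String) (st : List String × List (List String))
    (hB : PySem.Str.pyGet? l 0 = some 'B') :
    pvStepP st (t, l) = ([PySem.Str.slice l (some 2) none, t],
      if st.1.length > 0 then st.2 ++ [st.1] else st.2) := by
  have hB' : PySem.List.pyGet? l.toList 0 = some 'B' := by simpa using hB
  have hO : l ≠ "O" := by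
    rintro rfl; exact absurd hB (by decide)
  simp [pvStepP, hB', hO]

theorem pvStepP_I (t l : String) (st : List String × List (List String))
    (hB : ¬ PySem.Str.pyGet? l 0 = some 'B') (hO : l ≠ "O") :
    pvStepP st (t, l) = (st.1 ++ [t], st.2) := by
  have hB' : ¬ PySem.List.pyGet? l.toList 0 = some 'B' := by simpa using hB
  simp [pvStepP, hB', hO]

-- closing A's inner loop: its result is the accumulated mentions plus the run of the open mention
theorem pv_close_foldA (ps : List (String × String)) :
    ∀ (m : List String) (ms : List (List String)),
    (if (ps.foldl pvStepP (m, ms)).1.length > 0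
      then (ps.foldl pvStepP (m, ms)).2 ++ [(ps.foldl pvStepP (m, ms)).1]
      else (ps.foldl pvStepP (m, ms)).2) = ms ++ pvRunA m ps := by
  induction ps with
  | nil =>
    intro m ms
    by_cases hm : m.length > 0 <;> simp [pvRunA, hm]
  | cons p rest ih =>
    intro m ms
    obtain ⟨t, l⟩ := p
    by_cases hO : l = "O"
    · subst hO
      rw [List.foldl_cons, pvStepP_O, ih]
      have hr : pvRunA m ((t, "O") :: rest)
          = (if m.length > 0 then [m] else []) ++ pvRunA [] rest := by
        simp [pvRunA]
      rw [hr]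
      split_ifs <;> simp
    · by_cases hB : PySem.Str.pyGet? l 0 = some 'B'
      · have hB' : PySem.List.pyGet? l.toList 0 = some 'B' := by simpa using hB
        rw [List.foldl_cons, pvStepP_B t l _ hB, ih]
        have hr : pvRunA m ((t, l) :: rest)
            = (if m.length > 0 then [m] else []) ++ pvRunA [PySem.Str.slice l (some 2) none, t] rest := by
          simp [pvRunA, hO, hB']
        rw [hr]
        split_ifs <;> simp
      · have hB' : ¬ PySem.List.pyGet? l.toList 0 = some 'B' := by simpa using hB
        rw [List.foldl_cons, pvStepP_I t l _ hB hO, ih]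
        have hr : pvRunA m ((t, l) :: rest) = pvRunA (m ++ [t]) rest := by
          simp [pvRunA, hO, hB']
        rw [hr]

-- run lemma: an open mention swallows exactly the continuation run
theorem pv_runA_run (rest : List (String × String)) :
    ∀ (m : List String), m ≠ [] →
    pvRunA m rest = (m ++ (rest.takeWhile pvContP).map Prod.fst)
      :: pvRunA [] (rest.drop (rest.takeWhile pvContP).length) := by
  induction rest with
  | nil =>
    intro m hm
    simp [pvRunA, List.length_pos_of_ne_nil hm]
  | cons p rest ih =>
    intro m hm
    obtain ⟨t, l⟩ := p
    have hmlen : m.length > 0 := List.length_pos_of_ne_nil hm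
    by_cases hO : l = "O"
    · subst hO
      have hc : pvContP (t, "O") = false := by simp [pvContP]
      simp [pvRunA, hc, hmlen]
    · by_cases hB : PySem.Str.pyGet? l 0 = some 'B'
      · have hB' : PySem.List.pyGet? l.toList 0 = some 'B' := by simpa using hB
        have hc : pvContP (t, l) = false := by simp [pvContP, hB']
        simp [pvRunA, hO, hB', hc, hmlen]
      · have hB' : ¬ PySem.List.pyGet? l.toList 0 = some 'B' := by simpa using hB
        have hc : pvContP (t, l) = true := by simp [pvContP, hB', hO]
        have hr : pvRunA m ((t, l) :: rest) = pvRunA (m ++ [t]) rest := by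
          simp [pvRunA, hO, hB']
        rw [hr, ih (m ++ [t]) (by simp)]
        simp [hc]

theorem pvSegsM_nil : pvSegsM [] = [] := by rw [pvSegsM.eq_def]

-- B's segments are exactly A's mentions
theorem pv_segsM_eq_runA (ps : List (String × String)) :
    pvSegsM ps = pvRunA [] ps := by
  fun_induction pvSegsM ps with
  | case1 => simp [pvRunA]
  | case2 t l rest hO ih =>
    have hO' : l = "O" := by simpa using hO
    subst hO'
    have hr : pvRunA [] ((t, "O") :: rest) = pvRunA [] rest := by
      simp [pvRunA]
    rw [hr, ih]
  | case3 t l rest hO cont ih =>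
    have hO' : ¬ l = "O" := by simpa using hO
    have hcont : cont = rest.takeWhile pvContP := rfl
    by_cases hB : PySem.Str.pyGet? l 0 = some 'B'
    · have hB' : PySem.List.pyGet? l.toList 0 = some 'B' := by simpa using hB
      have hr : pvRunA [] ((t, l) :: rest)
          = pvRunA [PySem.Str.slice l (some 2) none, t] rest := by
        simp [pvRunA, hO', hB']
      rw [hr, pv_runA_run rest [PySem.Str.slice l (some 2) none, t] (by simp), ← hcont, ← ih]
      simp [hB']
    · have hB' : ¬ PySem.List.pyGet? l.toList 0 = some 'B' := by simpa using hB
      have hr : pvRunA [] ((t, l) :: rest) = pvRunA [t] rest := by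
        simp [pvRunA, hO', hB']
      rw [hr, pv_runA_run rest [t] (by simp), ← hcont, ← ih]
      simp [hB']

-- B's setdefault-then-assign step coincides with A's if-not-in-then-assign grouping step
theorem pv_stepB_eq_groupA (d : PySem.Dict String (PySem.Dict String Int)) (mention : List String) :
    (let m0 := PySem.List.pyGetD mention 0 "";
     let d := d.setdefault m0 PySem.Dict.empty;
     d.insert m0 ((d.getD m0 PySem.Dict.empty).insert (PySem.Str.join " " (PySem.List.slice mention (some 1) none)) 1))
    = pvGroupA d mention := by
  unfold pvGroupA
  dsimp only
  by_cases hc : d.contains (PySem.List.pyGetD mention 0 "") = true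
  · rw [PySem.Dict.setdefault_of_contains d _ hc]
    simp [hc]
  · simp only [Bool.not_eq_true] at hc
    rw [PySem.Dict.setdefault_of_not_contains d _ hc]
    simp [hc, PySem.Dict.getD_insert_self]

-- B's per-sentence loop is the fold of A's grouping step over the mention runs
theorem pv_segLoop_eq (toks labs : List String) (d : PySem.Dict String (PySem.Dict String Int)) :
    pvSegLoop toks labs d = (pvSegsM (toks.zip labs)).foldl pvGroupA d := by
  fun_induction pvSegLoop toks labs d with
  | case1 => simp [pvSegsM_nil]
  | case2 => simp [pvSegsM_nil]
  | case3 d t ts l ls hO ih =>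
    rw [List.zip_cons_cons, pvSegsM.eq_def]
    simp only [hO, if_pos]
    exact ih
  | case4 d t ts l ls hO z cont rest mention mention2 m0 d2 d3 ih =>
    have hzip : (rest.map Prod.fst).zip (rest.map Prod.snd) = rest := (List.zip_of_prod rfl rfl).symm
    rw [hzip] at ih
    rw [List.zip_cons_cons, pvSegsM.eq_def]
    simp only [hO, if_neg, Bool.not_eq_true]
    rw [List.foldl_cons]
    have hrest : rest = (ts.zip ls).drop ((ts.zip ls).takeWhile pvContP).length := rfl
    have hmention : (if PySem.Str.pyGet? l 0 == some 'B' then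
          PySem.Str.slice l (some 2) none :: t :: ((ts.zip ls).takeWhile pvContP).map Prod.fst
        else t :: ((ts.zip ls).takeWhile pvContP).map Prod.fst) = mention2 := rfl
    rw [hmention, ← hrest, ih]
    exact congrArg (fun d0 => (pvSegsM rest).foldl pvGroupA d0) (pv_stepB_eq_groupA d mention2)

-- A's inner loop over enumerate+index equals the fold of pvStepP over the zipped stripped row
theorem pvInnerA_eq (ls : List (List String)) (si i : Int) (tok : String)
    (st : List String × List (List String)) :
    pvInnerA ls si st (i, tok)
      = pvStepP st (tok, PySem.Str.strip (PySem.List.pyGetD (PySem.List.pyGetD ls si []) i "")) := rfl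

theorem pv_inner_bridge (ls : List (List String)) (si : Nat) (row : List String)
    (hrow : PySem.List.pyGetD ls ((si : Nat) : Int) [] = row) (toks : List String) :
    ∀ (k : Nat) (st : List String × List (List String)), toks.length + k ≤ row.length →
    (PySem.List.enumerate toks ((k : Nat) : Int)).foldl (pvInnerA ls ((si : Nat) : Int)) st
      = (toks.zip ((row.map PySem.Str.strip).drop k)).foldl pvStepP st := by
  induction toks with
  | nil => intro k st _; simp [PySem.List.enumerate_nil]
  | cons t ts ih =>
    intro k st hlen
    have hk : k < row.length := by simp at hlen; omega
    have hk' : k < (row.map PySem.Str.strip).length := by simpa using hk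
    rw [PySem.List.enumerate_cons, List.foldl_cons, pvInnerA_eq, hrow,
        List.drop_eq_getElem_cons hk', List.zip_cons_cons, List.foldl_cons]
    have hget : PySem.List.pyGetD row ((k : Nat) : Int) "" = row[k] := by
      simp [List.getD_eq_getElem?_getD, hk]
    rw [hget]
    have hgm : (row.map PySem.Str.strip)[k] = PySem.Str.strip row[k] := by simp
    rw [hgm]
    have hcast : ((k : Nat) : Int) + 1 = (((k + 1 : Nat)) : Int) := by push_cast; ring
    rw [hcast, ih (k + 1) _ (by simp at hlen ⊢; omega)]

-- A's outer loop flattens to the per-sentence runs over the zipped input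
theorem pv_outer_bridge (ls : List (List String)) (ss : List (List String)) :
    ∀ (k : Nat) (acc : List (List String)),
    (∀ i < ss.length, ss.getD i [] ≠ [] →
      k + i < ls.length ∧ (ss.getD i []).length ≤ (ls.getD (k + i) []).length) →
    (PySem.List.enumerate ss ((k : Nat) : Int)).foldl (pvOuterA ls) acc
      = acc ++ (ss.zip (ls.drop k)).flatMap
          (fun p => pvRunA [] (p.1.zip (p.2.map PySem.Str.strip))) := by
  induction ss with
  | nil => intro k acc _; simp [PySem.List.enumerate_nil]
  | cons s ss' ih =>
    intro k acc hyp
    have hcast : ((k : Nat) : Int) + 1 = (((k + 1 : Nat)) : Int) := by push_cast; ring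
    rw [PySem.List.enumerate_cons, List.foldl_cons, hcast]
    have hyp' : ∀ i < ss'.length, ss'.getD i [] ≠ [] →
        (k + 1) + i < ls.length ∧ (ss'.getD i []).length ≤ (ls.getD ((k + 1) + i) []).length := by
      intro i hi hne
      have := hyp (i + 1) (by simp; omega) (by simpa using hne)
      simpa [Nat.add_assoc, Nat.add_comm 1 i] using this
    by_cases hk : k < ls.length
    · have hrow : PySem.List.pyGetD ls ((k : Nat) : Int) [] = ls[k] := by
        simp [List.getD_eq_getElem?_getD, hk]
      have hlen : s.length ≤ ls[k].length := by
        by_cases hs : s = []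
        · simp [hs]
        · have := hyp 0 (by simp) (by simpa using hs)
          simpa [List.getD_eq_getElem?_getD, hk] using this.2
      have hstep : pvOuterA ls acc ((k : Nat), s)
          = acc ++ pvRunA [] (s.zip (ls[k].map PySem.Str.strip)) := by
        unfold pvOuterA
        rw [show ((0 : Int)) = (((0 : Nat)) : Int) from rfl,
            pv_inner_bridge ls k ls[k] hrow s 0 ([], acc) (by simpa using hlen)]
        rw [List.drop_zero]
        exact pv_close_foldA _ [] acc
      rw [hstep, ih (k + 1) _ hyp']
      rw [List.drop_eq_getElem_cons hk, List.zip_cons_cons, List.flatMap_cons, List.append_assoc]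
    · have hs : s = [] := by
        by_contra hs
        have := (hyp 0 (by simp) (by simpa using hs)).1
        omega
      subst hs
      have hstep : pvOuterA ls acc ((k : Nat), ([] : List String)) = acc := by
        simp [pvOuterA, PySem.List.enumerate_nil]
      rw [hstep, ih (k + 1) _ hyp']
      have h1 : ls.drop k = [] := List.drop_eq_nil_of_le (by omega)
      have h2 : ls.drop (k + 1) = [] := List.drop_eq_nil_of_le (by omega)
      simp [h1, h2]

-- ===== VERDICT (by name: the statement is the Claim_ definition above) =====
theorem get_category2mentions_spec : Claim_equal_get_category2mentions := by
  intro ss ls _ hpre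
  unfold Spec_get_category2mentions get_category2mentions get_category2mentions_alt
  show (((PySem.List.enumerate ss 0).foldl (pvOuterA ls) []).foldl pvGroupA PySem.Dict.empty).items.map
        (fun p => (p.1, p.2.keys))
      = (((ss.zip ls).foldl (fun d p => pvSegLoop p.1 (p.2.map PySem.Str.strip) d) PySem.Dict.empty).items).map
        (fun p => (p.1, p.2.keys))
  have houter := pv_outer_bridge ls ss 0 []
    (by intro i hi hne; simpa using ⟨(hpre i hi hne).1, (hpre i hi hne).2.1⟩)
  simp only [Nat.cast_zero, List.drop_zero, List.nil_append] at houter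
  rw [houter]
  have halt : (ss.zip ls).foldl (fun d p => pvSegLoop p.1 (p.2.map PySem.Str.strip) d) PySem.Dict.empty
      = ((ss.zip ls).flatMap (fun p => pvSegsM (p.1.zip (p.2.map PySem.Str.strip)))).foldl pvGroupA PySem.Dict.empty := by
    rw [List.foldl_flatMap]
    apply PySem.List.foldl_congr_mem
    intro d p _
    exact pv_segLoop_eq p.1 (p.2.map PySem.Str.strip) d
  rw [halt]
  have hflat : (ss.zip ls).flatMap (fun p => pvSegsM (p.1.zip (p.2.map PySem.Str.strip)))
      = (ss.zip ls).flatMap (fun p => pvRunA [] (p.1.zip (p.2.map PySem.Str.strip))) :=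
    List.flatMap_congr (fun (p : List String × List String) _ =>
      pv_segsM_eq_runA (p.1.zip (p.2.map PySem.Str.strip)))
  rw [hflat]
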